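-- pv_equiv track=rewrite | github.com/ProgrammerNomad/DNSBunch | backend/dns_checker.py | _get_domain_status_recommendations
-- ===== SOURCE A (Python) =====
-- from typing import Dict, List, Any, Optional
--
-- def _get_domain_status_recommendations(critical_issues: List[str], warnings: List[str]) -> List[str]:
--     """Get recommendations based on domain status issues"""
--     recommendations = []
--
--     if any('expired' in issue.lower() or 'suspended' in issue.lower() for issue in critical_issues + warnings):
--         recommendations.extend([
--             "Check domain registration status with your registrar",
--             "Verify domain renewal payments are up to date",
--             "Contact your domain registrar if domain appears suspended"
--         ])
--
--     if any('ns' in issue.lower() for issue in critical_issues + warnings):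
--         recommendations.extend([
--             "Verify nameserver configuration with your DNS provider",
--             "Check if DNS hosting service is active and paid",
--             "Test DNS propagation across different locations"
--         ])
--
--     if any('parking' in issue.lower() for issue in warnings):
--         recommendations.extend([
--             "Configure proper web hosting if domain should be active",
--             "Remove parking service if no longer needed",
--             "Set up proper A records pointing to your hosting"
--         ])
--
--     if any('timeout' in issue.lower() or 'servfail' in issue.lower() for issue in warnings):
--         recommendations.extend([
--             "DNS server performance issues detected",
--             "Try switching to different DNS provider",
--             "Contact DNS hosting provider about server issues"
--         ])
--
--     if not recommendations:
--         recommendations = [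
--             "Domain appears healthy - no immediate action needed",
--             "Monitor DNS performance regularly",
--             "Consider implementing DNSSEC for security"
--         ]
--
--     return recommendations
-- ===== SOURCE B (Python) =====
-- from typing import Dict, List, Any, Optional
--
-- _MESSAGES = [
--     ["Check domain registration status with your registrar",
--      "Verify domain renewal payments are up to date",
--      "Contact your domain registrar if domain appears suspended"],
--     ["Verify nameserver configuration with your DNS provider",
--      "Check if DNS hosting service is active and paid",
--      "Test DNS propagation across different locations"],
--     ["Configure proper web hosting if domain should be active",
--      "Remove parking service if no longer needed",
--      "Set up proper A records pointing to your hosting"],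
--     ["DNS server performance issues detected",
--      "Try switching to different DNS provider",
--      "Contact DNS hosting provider about server issues"],
-- ]
--
-- _HEALTHY = [
--     "Domain appears healthy - no immediate action needed",
--     "Monitor DNS performance regularly",
--     "Consider implementing DNSSEC for security",
-- ]
--
--
-- def _get_domain_status_recommendations(critical_issues: List[str], warnings: List[str]) -> List[str]:
--     # One pass over the data: mark which rule-categories fire, then assemble.
--     fired = [False, False, False, False]
--     for issue in critical_issues:
--         s = issue.lower()
--         fired[0] = fired[0] or 'expired' in s or 'suspended' in s
--         fired[1] = fired[1] or 'ns' in s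
--     for issue in warnings:
--         s = issue.lower()
--         fired[0] = fired[0] or 'expired' in s or 'suspended' in s
--         fired[1] = fired[1] or 'ns' in s
--         fired[2] = fired[2] or 'parking' in s
--         fired[3] = fired[3] or 'timeout' in s or 'servfail' in s
--     out = [msg for i in range(4) if fired[i] for msg in _MESSAGES[i]]
--     return out or list(_HEALTHY)
-- ===== Notes on version B (the rewrite author's own statement) =====
-- stated objective: alternative
-- what changed: Instead of A's four separate any-scans over the issue lists, B makes a single pass over each list maintaining a four-flag accumulator (which rule categories fired, respecting that critical issues only feed the first two), then assembles the output from the flags.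
import Mathlib
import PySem

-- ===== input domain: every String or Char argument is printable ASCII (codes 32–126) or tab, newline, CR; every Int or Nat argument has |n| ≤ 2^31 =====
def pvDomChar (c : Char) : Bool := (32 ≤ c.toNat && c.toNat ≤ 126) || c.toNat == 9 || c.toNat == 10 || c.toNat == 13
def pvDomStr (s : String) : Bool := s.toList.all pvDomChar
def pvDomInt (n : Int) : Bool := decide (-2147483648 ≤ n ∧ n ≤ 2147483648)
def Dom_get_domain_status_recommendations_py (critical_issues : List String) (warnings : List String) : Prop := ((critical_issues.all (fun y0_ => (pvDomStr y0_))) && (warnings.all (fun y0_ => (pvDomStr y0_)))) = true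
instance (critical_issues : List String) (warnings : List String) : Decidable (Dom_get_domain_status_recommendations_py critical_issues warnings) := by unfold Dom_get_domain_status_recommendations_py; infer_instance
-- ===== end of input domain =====

-- B replaces A's four separate any-scans with one pass per list maintaining a four-flag accumulator (alternative decomposition, same cost).

-- ===== PORT A =====
-- literal transliteration of A: four successive conditional extends, then the empty-fallback
def get_domain_status_recommendations_py (critical_issues : List String) (warnings : List String) : List String :=
  let recommendations : List String := []
  let recommendations :=
    if (critical_issues ++ warnings).any (fun issue =>
        PySem.Str.isIn "expired" (PySem.Str.lower issue) || PySem.Str.isIn "suspended" (PySem.Str.lower issue)) then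
      recommendations ++ ["Check domain registration status with your registrar",
        "Verify domain renewal payments are up to date",
        "Contact your domain registrar if domain appears suspended"]
    else recommendations
  let recommendations :=
    if (critical_issues ++ warnings).any (fun issue => PySem.Str.isIn "ns" (PySem.Str.lower issue)) then
      recommendations ++ ["Verify nameserver configuration with your DNS provider",
        "Check if DNS hosting service is active and paid",
        "Test DNS propagation across different locations"]
    else recommendations
  let recommendations :=
    if warnings.any (fun issue => PySem.Str.isIn "parking" (PySem.Str.lower issue)) then
      recommendations ++ ["Configure proper web hosting if domain should be active",
        "Remove parking service if no longer needed",
        "Set up proper A records pointing to your hosting"]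
    else recommendations
  let recommendations :=
    if warnings.any (fun issue =>
        PySem.Str.isIn "timeout" (PySem.Str.lower issue) || PySem.Str.isIn "servfail" (PySem.Str.lower issue)) then
      recommendations ++ ["DNS server performance issues detected",
        "Try switching to different DNS provider",
        "Contact DNS hosting provider about server issues"]
    else recommendations
  if recommendations.isEmpty then
    ["Domain appears healthy - no immediate action needed",
     "Monitor DNS performance regularly",
     "Consider implementing DNSSEC for security"]
  else recommendations

-- ===== PORT B =====
-- B's per-category message lists and the healthy fallback
def pvMsg0 : List String :=
  ["Check domain registration status with your registrar",
   "Verify domain renewal payments are up to date",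
   "Contact your domain registrar if domain appears suspended"]
def pvMsg1 : List String :=
  ["Verify nameserver configuration with your DNS provider",
   "Check if DNS hosting service is active and paid",
   "Test DNS propagation across different locations"]
def pvMsg2 : List String :=
  ["Configure proper web hosting if domain should be active",
   "Remove parking service if no longer needed",
   "Set up proper A records pointing to your hosting"]
def pvMsg3 : List String :=
  ["DNS server performance issues detected",
   "Try switching to different DNS provider",
   "Contact DNS hosting provider about server issues"]
def pvHealthy : List String :=
  ["Domain appears healthy - no immediate action needed",
   "Monitor DNS performance regularly",
   "Consider implementing DNSSEC for security"]

-- one step of B's pass over critical_issues: only the first two flags can fire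
def pvStepC (f : Bool × Bool × Bool × Bool) (issue : String) : Bool × Bool × Bool × Bool :=
  let s := PySem.Str.lower issue
  (f.1 || PySem.Str.isIn "expired" s || PySem.Str.isIn "suspended" s,
   f.2.1 || PySem.Str.isIn "ns" s, f.2.2.1, f.2.2.2)

-- one step of B's pass over warnings: all four flags can fire
def pvStepW (f : Bool × Bool × Bool × Bool) (issue : String) : Bool × Bool × Bool × Bool :=
  let s := PySem.Str.lower issue
  (f.1 || PySem.Str.isIn "expired" s || PySem.Str.isIn "suspended" s,
   f.2.1 || PySem.Str.isIn "ns" s,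
   f.2.2.1 || PySem.Str.isIn "parking" s,
   f.2.2.2 || PySem.Str.isIn "timeout" s || PySem.Str.isIn "servfail" s)

def get_domain_status_recommendations_py_alt (critical_issues : List String) (warnings : List String) : List String :=
  let fired := warnings.foldl pvStepW (critical_issues.foldl pvStepC (false, false, false, false))
  let out := (if fired.1 then pvMsg0 else []) ++ (if fired.2.1 then pvMsg1 else [])
          ++ (if fired.2.2.1 then pvMsg2 else []) ++ (if fired.2.2.2 then pvMsg3 else [])
  if out.isEmpty then pvHealthy else out

-- ===== PRECONDITION & SPEC =====
def Spec_get_domain_status_recommendations_py (critical_issues : List String) (warnings : List String) (out : List String) : Prop := out = get_domain_status_recommendations_py_alt critical_issues warnings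
instance (critical_issues : List String) (warnings : List String) (out : List String) : Decidable (Spec_get_domain_status_recommendations_py critical_issues warnings out) := by unfold Spec_get_domain_status_recommendations_py; infer_instance

-- ===== CLAIM =====
def Claim_equal_get_domain_status_recommendations_py : Prop := ∀ (critical_issues : List String) (warnings : List String), Dom_get_domain_status_recommendations_py critical_issues warnings → Spec_get_domain_status_recommendations_py critical_issues warnings (get_domain_status_recommendations_py critical_issues warnings)

-- ===== LEMMAS AND PROOFS =====

-- B's fold over critical_issues computes the first two flags as 'any' scans and leaves the last two
theorem pvFoldC (c : List String) (f : Bool × Bool × Bool × Bool) :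
    c.foldl pvStepC f =
      (f.1 || c.any (fun issue => PySem.Str.isIn "expired" (PySem.Str.lower issue) || PySem.Str.isIn "suspended" (PySem.Str.lower issue)),
       f.2.1 || c.any (fun issue => PySem.Str.isIn "ns" (PySem.Str.lower issue)),
       f.2.2.1, f.2.2.2) := by
  induction c generalizing f with
  | nil => simp
  | cons x xs ih =>
    simp [List.foldl_cons, ih, pvStepC, Bool.or_assoc]

-- B's fold over warnings computes all four flags as 'any' scans
theorem pvFoldW (w : List String) (f : Bool × Bool × Bool × Bool) :
    w.foldl pvStepW f =
      (f.1 || w.any (fun issue => PySem.Str.isIn "expired" (PySem.Str.lower issue) || PySem.Str.isIn "suspended" (PySem.Str.lower issue)),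
       f.2.1 || w.any (fun issue => PySem.Str.isIn "ns" (PySem.Str.lower issue)),
       f.2.2.1 || w.any (fun issue => PySem.Str.isIn "parking" (PySem.Str.lower issue)),
       f.2.2.2 || w.any (fun issue => PySem.Str.isIn "timeout" (PySem.Str.lower issue) || PySem.Str.isIn "servfail" (PySem.Str.lower issue))) := by
  induction w generalizing f with
  | nil => simp
  | cons x xs ih =>
    simp [List.foldl_cons, ih, pvStepW, Bool.or_assoc]

-- the if-structure of A equals the assembly of B, for arbitrary flag values
theorem pvMain (b0 b1 b2 b3 : Bool) :
    (let recommendations : List String := []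
     let recommendations := if b0 then recommendations ++ ["Check domain registration status with your registrar",
        "Verify domain renewal payments are up to date",
        "Contact your domain registrar if domain appears suspended"] else recommendations
     let recommendations := if b1 then recommendations ++ ["Verify nameserver configuration with your DNS provider",
        "Check if DNS hosting service is active and paid",
        "Test DNS propagation across different locations"] else recommendations
     let recommendations := if b2 then recommendations ++ ["Configure proper web hosting if domain should be active",
        "Remove parking service if no longer needed",
        "Set up proper A records pointing to your hosting"] else recommendations
     let recommendations := if b3 then recommendations ++ ["DNS server performance issues detected",
        "Try switching to different DNS provider",
        "Contact DNS hosting provider about server issues"] else recommendations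
     if recommendations.isEmpty then
       ["Domain appears healthy - no immediate action needed",
        "Monitor DNS performance regularly",
        "Consider implementing DNSSEC for security"]
     else recommendations) =
    (let out := (if b0 then pvMsg0 else []) ++ (if b1 then pvMsg1 else [])
             ++ (if b2 then pvMsg2 else []) ++ (if b3 then pvMsg3 else [])
     if out.isEmpty then pvHealthy else out) := by
  cases b0 <;> cases b1 <;> cases b2 <;> cases b3 <;> rfl

-- ===== VERDICT =====
theorem get_domain_status_recommendations_py_spec : Claim_equal_get_domain_status_recommendations_py := by
  intro c w _
  unfold Spec_get_domain_status_recommendations_py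
  unfold get_domain_status_recommendations_py get_domain_status_recommendations_py_alt
  simp only [pvFoldC, pvFoldW, List.any_append]
  exact pvMain _ _ _ _
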